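-- pv_equiv track=rewrite | github.com/Feyerabend/bb | workbook/ch06/tidy/tidyvm.py | running_paren_sums
-- ===== SOURCE A (Python) =====
-- def running_paren_sums(program):
--     "Track running sum of parenthesis balance."
--     count_open_parens = lambda line: line.count("(") - line.count(")")
--     paren_counts = list(map(count_open_parens, program))
--     rps = []
--     total = 0
--     for paren_count in paren_counts:
--         total += paren_count
--         rps.append(total)
--     return rps
-- ===== SOURCE B (Python) =====
-- def running_paren_sums(program):
--     "Track running sum of parenthesis balance."
--     total = 0
--     rps = []
--     for line in program:
--         for ch in line:
--             if ch == "(":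
--                 total += 1
--             elif ch == ")":
--                 total -= 1
--         rps.append(total)
--     return rps
-- ===== Notes on version B (the rewrite author's own statement) =====
-- stated objective: simpler
-- what changed: B drops the intermediate per-line count list and the separate prefix-sum loop, carrying one running balance across an explicit character-by-character traversal of each line.
import Mathlib
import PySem

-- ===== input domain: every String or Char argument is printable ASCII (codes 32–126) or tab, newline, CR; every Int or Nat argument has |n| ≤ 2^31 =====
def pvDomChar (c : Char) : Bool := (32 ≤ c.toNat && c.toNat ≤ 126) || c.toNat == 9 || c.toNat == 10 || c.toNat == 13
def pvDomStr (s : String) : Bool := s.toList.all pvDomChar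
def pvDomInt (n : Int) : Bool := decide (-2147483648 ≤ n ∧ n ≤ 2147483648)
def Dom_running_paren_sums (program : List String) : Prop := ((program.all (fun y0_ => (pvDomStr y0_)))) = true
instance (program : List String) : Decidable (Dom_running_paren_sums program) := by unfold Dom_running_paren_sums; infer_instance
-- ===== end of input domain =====

-- B replaces A's per-line str.count map + prefix-sum loop by one character-by-character
-- traversal carrying a single running balance (objective: simpler).

-- ===== PORT A =====
def running_paren_sums (program : List String) : List Int :=
  let paren_counts : List Int :=
    program.map (fun line => (PySem.Str.count line "(" : Int) - (PySem.Str.count line ")" : Int))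
  (paren_counts.foldl (fun (st : List Int × Int) paren_count =>
      let total := st.2 + paren_count
      (st.1 ++ [total], total)) ([], 0)).1

-- ===== PORT B =====
def running_paren_sums_alt (program : List String) : List Int :=
  (program.foldl (fun (st : List Int × Int) line =>
      let total := line.toList.foldl
        (fun (t : Int) ch => if ch = '(' then t + 1 else if ch = ')' then t - 1 else t) st.2
      (st.1 ++ [total], total)) ([], 0)).1

-- ===== PRECONDITION & SPEC =====
def Spec_running_paren_sums (program : List String) (out : List Int) : Prop := out = running_paren_sums_alt program
instance (program : List String) (out : List Int) : Decidable (Spec_running_paren_sums program out) := by unfold Spec_running_paren_sums; infer_instance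

-- ===== CLAIM (what is proved, stated in full; the proofs are below) =====
def Claim_equal_running_paren_sums : Prop := ∀ (program : List String), Dom_running_paren_sums program → Spec_running_paren_sums program (running_paren_sums program)

-- ===== LEMMAS AND PROOFS =====

theorem pv_go_single (c : Char) : ∀ (cs : List Char) (fuel acc : Nat), cs.length ≤ fuel →
    PySem.Chars.count.go [c] fuel cs acc = acc + cs.count c := by
  intro cs
  induction cs with
  | nil => intro fuel acc h; cases fuel <;> simp [PySem.Chars.count.go]
  | cons d t ih =>
    intro fuel acc h
    cases fuel with
    | zero => simp at h
    | succ f =>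
      have h' : t.length ≤ f := by simpa using h
      by_cases hc : c = d
      · subst hc
        simp [PySem.Chars.count.go, List.isPrefixOf, ih f (acc + 1) h']
        omega
      · simp [PySem.Chars.count.go, List.isPrefixOf, hc, Ne.symm hc, ih f acc h']

theorem pv_count_single (cs : List Char) (c : Char) :
    PySem.Chars.count cs [c] = cs.count c := by
  simp [PySem.Chars.count, pv_go_single c cs cs.length 0 le_rfl]

theorem pv_char_fold (cs : List Char) (t : Int) :
    cs.foldl (fun (t : Int) ch => if ch = '(' then t + 1 else if ch = ')' then t - 1 else t) t
      = t + (cs.count '(' : Int) - (cs.count ')' : Int) := by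
  induction cs generalizing t with
  | nil => simp
  | cons d cs ih =>
    by_cases h1 : d = '('
    · subst h1; simp [ih]; ring
    · by_cases h2 : d = ')'
      · subst h2; simp [ih, h1]; ring
      · simp [ih, h1, h2]

theorem pv_line_total (line : String) (t : Int) :
    line.toList.foldl
        (fun (t : Int) ch => if ch = '(' then t + 1 else if ch = ')' then t - 1 else t) t
      = t + ((PySem.Str.count line "(" : Int) - (PySem.Str.count line ")" : Int)) := by
  have h1 : PySem.Str.count line "(" = line.toList.count '(' := by
    simpa using pv_count_single line.toList '('
  have h2 : PySem.Str.count line ")" = line.toList.count ')' := by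
    simpa using pv_count_single line.toList ')'
  rw [pv_char_fold, h1, h2]; ring

-- ===== VERDICT (by name: the statement is the Claim_ definition above) =====
theorem running_paren_sums_spec : Claim_equal_running_paren_sums := by
  intro program _
  unfold Spec_running_paren_sums running_paren_sums running_paren_sums_alt
  simp only []
  rw [List.foldl_map]
  have hstep : (fun (st : List Int × Int) (line : String) =>
        let total := st.2 + ((PySem.Str.count line "(" : Int) - (PySem.Str.count line ")" : Int))
        (st.1 ++ [total], total))
      = (fun (st : List Int × Int) (line : String) =>
        let total := line.toList.foldl
          (fun (t : Int) ch => if ch = '(' then t + 1 else if ch = ')' then t - 1 else t) st.2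
        (st.1 ++ [total], total)) := by
    funext st line
    simp [pv_line_total]
  rw [hstep]
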